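-- pv_equiv track=rewrite | github.com/PentHertz/urh-ng | src/urh/awre/ProtocolMatcher.py | _extract_first_packet
-- ===== SOURCE A (Python) =====
-- def _extract_first_packet(bits: str) -> str:
--     """
--     If a raw bit string contains multiple repeated packets
--     (same preamble pattern appearing again after data + silence),
--     extract only the first complete packet.
--
--     Looks for a second preamble (alternating 10101010 pattern of >= 8 bits)
--     that appears after a long zero gap (>= 10 zeros). Returns everything
--     before the inter-packet gap, keeping all data bits intact.
--     """
--     if not bits or len(bits) < 20:
--         return bits
--
--     # Find first preamble
--     i = 0
--     while i < len(bits) and bits[i] == "0":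
--         i += 1
--
--     # Skip past the first preamble
--     ps = i
--     while ps < len(bits) - 1:
--         if bits[ps] == bits[ps + 1]:
--             break
--         ps += 1
--
--     if ps - i < 4:
--         return bits  # no valid preamble found
--
--     # Skip past the first packet's data (at least 30 bits after preamble)
--     search_from = ps + 30
--
--     # Look for a second preamble: alternating bits after a gap
--     j = search_from
--     while j < len(bits) - 10:
--         if bits[j] == "0":
--             zero_start = j
--             while j < len(bits) and bits[j] == "0":
--                 j += 1
--             zero_len = j - zero_start
--
--             if zero_len >= 10 and j < len(bits) - 8:
--                 alt = 0
--                 k = j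
--                 while k < len(bits) - 1:
--                     if bits[k] == bits[k + 1]:
--                         break
--                     alt += 1
--                     k += 1
--                 if alt >= 8:
--                     # Found second preamble at bit j.
--                     # Include the data + trailing zeros (padding) but
--                     # stop before the second preamble starts.
--                     # Keep half the zero gap as padding for the first
--                     # packet (helps with padding-based scoring).
--                     mid_gap = zero_start + (j - zero_start) // 2
--                     return bits[:mid_gap]
--         else:
--             j += 1
--
--     return bits
-- ===== SOURCE B (Python) =====
-- def _extract_first_packet(bits: str) -> str:
--     n = len(bits)
--     if n < 20:
--         return bits
--
--     # Run-length encode the whole string once: (char, start, end).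
--     runs = []
--     s = 0
--     for t in range(1, n + 1):
--         if t == n or bits[t] != bits[t - 1]:
--             runs.append((bits[s], s, t))
--             s = t
--
--     # Starts of runs of length >= 2 = positions of adjacent equal bit pairs.
--     eqstarts = [st for (_, st, en) in runs if en - st >= 2]
--
--     def first_at_least(pos):
--         # first equal-pair position >= pos (eqstarts is sorted)
--         for q in eqstarts:
--             if q >= pos:
--                 return q
--         return None
--
--     def alt_len(pos):
--         # length of the alternating stretch starting at pos
--         q = first_at_least(pos)
--         stop = q if q is not None else n - 1
--         return max(0, min(stop, n - 1) - pos)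
--
--     # first preamble: skip the leading zero run, then its alternating length
--     i = runs[0][2] if runs[0][0] == "0" else 0
--     ps = i + alt_len(i)
--     if ps - i < 4:
--         return bits
--
--     search_from = ps + 30
--
--     # candidate inter-packet gaps: zero runs of the table reaching past search_from
--     for c, st, en in runs:
--         if c != "0" or en <= search_from:
--             continue
--         zs = max(st, search_from)
--         if zs >= n - 10:
--             break
--         if en - zs >= 10 and en < n - 8 and alt_len(en) >= 8:
--             return bits[: zs + (en - zs) // 2]
--     return bits
-- ===== Notes on version B (the rewrite author's own statement) =====
-- stated objective: alternative
-- what changed: B run-length-encodes the string once into a (char,start,end) table and does all the work on it: the first preamble and every alternating-stretch length are read off a precomputed sorted list of equal-adjacent-pair positions, and second-preamble candidates are the zero runs of the table reaching past search_from, so no char-by-char scanning loop remains.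
import Mathlib
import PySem

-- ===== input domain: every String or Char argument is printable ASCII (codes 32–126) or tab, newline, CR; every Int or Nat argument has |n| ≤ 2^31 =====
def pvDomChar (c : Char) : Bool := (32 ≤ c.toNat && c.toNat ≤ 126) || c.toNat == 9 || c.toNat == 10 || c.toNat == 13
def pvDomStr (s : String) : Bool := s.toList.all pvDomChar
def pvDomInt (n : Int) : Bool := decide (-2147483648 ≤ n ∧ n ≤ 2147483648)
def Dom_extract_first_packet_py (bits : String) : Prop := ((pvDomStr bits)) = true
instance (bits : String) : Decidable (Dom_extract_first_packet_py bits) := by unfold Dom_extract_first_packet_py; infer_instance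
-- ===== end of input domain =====

-- B builds a run-length-encoded table of the string once and answers every scan
-- (preamble, zero-gap candidates, alternating stretches) from that table;
-- alternative restructuring, same result.

-- ===== PORT A =====
-- "while p < n and bits[p] == '0': p += 1", as recursion on the suffix list
def pvLeadZeros : List Char → Nat
  | [] => 0
  | c :: t => if c = '0' then pvLeadZeros t + 1 else 0

-- "while p < n - 1: if bits[p] == bits[p+1]: break; p += 1", number of steps taken
def pvFirstEqAdj : List Char → Nat
  | a :: b :: t => if a = b then 0 else pvFirstEqAdj (b :: t) + 1
  | _ => 0

-- A's outer "while j < len(bits) - 10" scan; fuel = n + 1 bounds the strictly increasing j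
def pvLoopA (L : List Char) (n : Nat) : Nat → Nat → Option Nat
  | _, 0 => none
  | j, fuel + 1 =>
    if j < n - 10 then
      if L.getD j ' ' = '0' then
        let z := pvLeadZeros (L.drop j)      -- inner "while j < n and bits[j] == '0'"
        let j' := j + z
        if 10 ≤ z ∧ j' < n - 8 then
          if 8 ≤ pvFirstEqAdj (L.drop j') then   -- the "alt" counting loop
            some (j + (j' - j) / 2)
          else pvLoopA L n j' fuel
        else pvLoopA L n j' fuel
      else pvLoopA L n (j + 1) fuel
    else none

def extract_first_packet_py (bits : String) : String :=
  let L := bits.toList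
  let n := L.length
  if n = 0 ∨ n < 20 then bits
  else
    let i := pvLeadZeros L
    let ps := i + pvFirstEqAdj (L.drop i)
    if ps - i < 4 then bits
    else
      match pvLoopA L n (ps + 30) (n + 1) with
      | some m => String.ofList (L.take m)      -- bits[:mid_gap], m ≥ 0
      | none => bits

-- ===== PORT B =====
-- leading count of characters equal to c
def pvRunLen (c : Char) : List Char → Nat
  | [] => 0
  | d :: t => if d = c then pvRunLen c t + 1 else 0

-- Source B's run-length-encoding loop: maximal runs as (char, start, end)
def pvRLE : List Char → Nat → List (Char × Nat × Nat)
  | [], _ => []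
  | c :: t, pos =>
    let k := pvRunLen c t
    (c, pos, pos + k + 1) :: pvRLE (t.drop k) (pos + k + 1)
  termination_by l _ => l.length
  decreasing_by simp only [List.length_drop, List.length_cons]; omega

-- "[st for (_, st, en) in runs if en - st >= 2]"
def pvEqStarts (rs : List (Char × Nat × Nat)) : List Nat :=
  rs.filterMap (fun r => if 2 ≤ r.2.2 - r.2.1 then some r.2.1 else none)

-- Source B's first_at_least: first equal-pair position ≥ pos
def pvFirstGe (pos : Nat) : List Nat → Option Nat
  | [] => none
  | q :: t => if pos ≤ q then some q else pvFirstGe pos t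

-- Source B's alt_len; Nat truncated subtraction is exactly Python's max(0, ·) here
def pvAltLen (n pos : Nat) (eqs : List Nat) : Nat :=
  min ((pvFirstGe pos eqs).getD (n - 1)) (n - 1) - pos

-- Source B's "for c, st, en in runs" candidate loop (continue / break / return)
def pvScanB (n sf : Nat) (eqs : List Nat) : List (Char × Nat × Nat) → Option Nat
  | [] => none
  | (c, st, en) :: rest =>
    if c ≠ '0' ∨ en ≤ sf then pvScanB n sf eqs rest
    else
      let zs := max st sf
      if n - 10 ≤ zs then none
      else if 10 ≤ en - zs ∧ en < n - 8 ∧ 8 ≤ pvAltLen n en eqs then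
        some (zs + (en - zs) / 2)
      else pvScanB n sf eqs rest

def extract_first_packet_py_alt (bits : String) : String :=
  let L := bits.toList
  let n := L.length
  if n < 20 then bits
  else
    let runs := pvRLE L 0
    let eqs := pvEqStarts runs
    let i := match runs with
      | [] => 0                                  -- unreachable: n ≥ 20
      | (c, _, e) :: _ => if c = '0' then e else 0
    let ps := i + pvAltLen n i eqs
    if ps - i < 4 then bits
    else
      match pvScanB n (ps + 30) eqs runs with
      | some m => String.ofList (L.take m)
      | none => bits

-- ===== PRECONDITION & SPEC =====
def Spec_extract_first_packet_py (bits : String) (out : String) : Prop := out = extract_first_packet_py_alt bits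
instance (bits : String) (out : String) : Decidable (Spec_extract_first_packet_py bits out) := by unfold Spec_extract_first_packet_py; infer_instance

-- ===== CLAIM (what is proved, stated in full; the proofs are below) =====
def Claim_equal_extract_first_packet_py : Prop := ∀ (bits : String), Dom_extract_first_packet_py bits → Spec_extract_first_packet_py bits (extract_first_packet_py bits)

-- ===== LEMMAS AND PROOFS =====

theorem pvRunLen_le (c : Char) : ∀ t : List Char, pvRunLen c t ≤ t.length := by
  intro t; induction t with
  | nil => simp [pvRunLen]
  | cons d t ih =>
    by_cases h : d = c
    · simp only [pvRunLen, if_pos h, List.length_cons]; omega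
    · simp only [pvRunLen, if_neg h]; omega

theorem pvRunLen_chars (c : Char) : ∀ (t : List Char) (d : Nat), d < pvRunLen c t → t.getD d ' ' = c := by
  intro t
  induction t with
  | nil => intro d hd; simp [pvRunLen] at hd
  | cons a t ih =>
    intro d hd
    by_cases h : a = c
    · cases d with
      | zero => simp [h]
      | succ d =>
        simp only [pvRunLen, if_pos h] at hd
        simpa using ih d (by omega)
    · simp [pvRunLen, h] at hd

theorem pvRunLen_max (c : Char) : ∀ t : List Char, t.drop (pvRunLen c t) = [] ∨ (t.drop (pvRunLen c t)).getD 0 ' ' ≠ c := by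
  intro t
  induction t with
  | nil => left; simp
  | cons a t ih =>
    by_cases h : a = c
    · simp only [pvRunLen, if_pos h]; exact ih
    · right; simp only [pvRunLen, if_neg h, List.drop_zero, List.getD_cons_zero]; exact h

theorem pvRunLen_drop (c : Char) : ∀ (t : List Char) (d : Nat), d ≤ pvRunLen c t → pvRunLen c (t.drop d) = pvRunLen c t - d := by
  intro t
  induction t with
  | nil => intro d hd; simp [pvRunLen] at hd ⊢
  | cons a t ih =>
    intro d hd
    by_cases h : a = c
    · cases d with
      | zero => simp
      | succ d =>
        simp only [pvRunLen, if_pos h] at hd ⊢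
        rw [List.drop_succ_cons, ih d (by omega)]
        omega
    · simp only [pvRunLen, if_neg h] at hd
      interval_cases d
      simp

theorem pvLeadZeros_eq_runlen : ∀ l : List Char, pvLeadZeros l = pvRunLen '0' l := by
  intro l
  induction l with
  | nil => rfl
  | cons c t ih => by_cases h : c = '0' <;> simp [pvLeadZeros, pvRunLen, h, ih]

-- every eqstart q of the suffix table satisfies p ≤ q and q + 2 ≤ p + l.length
theorem pvEqStarts_bounds : ∀ (m : Nat) (l : List Char) (p x : Nat), l.length ≤ m →
    x ∈ pvEqStarts (pvRLE l p) → p ≤ x ∧ x + 2 ≤ p + l.length := by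
  intro m
  induction m with
  | zero =>
    intro l p x hm hx
    have : l = [] := List.eq_nil_of_length_eq_zero (by omega)
    subst this; simp [pvRLE, pvEqStarts] at hx
  | succ m ih =>
    intro l p x hm hx
    cases l with
    | nil => simp [pvRLE, pvEqStarts] at hx
    | cons c t =>
      have hk := pvRunLen_le c t
      rw [pvRLE] at hx
      simp only [pvEqStarts, List.filterMap_cons] at hx
      have hrec : x ∈ pvEqStarts (pvRLE (t.drop (pvRunLen c t)) (p + pvRunLen c t + 1)) →
          p ≤ x ∧ x + 2 ≤ p + (c :: t).length := by
        intro hmem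
        have := ih (t.drop (pvRunLen c t)) (p + pvRunLen c t + 1) x
          (by simp only [List.length_drop]; simp only [List.length_cons] at hm; omega) hmem
        simp [List.length_drop] at this ⊢
        omega
      by_cases h2 : 2 ≤ p + pvRunLen c t + 1 - p
      · simp only [if_pos h2] at hx
        rcases List.mem_cons.mp hx with h | h
        · subst h; simp; omega
        · exact hrec h
      · simp only [if_neg h2] at hx
        exact hrec hx

theorem pvFirstGe_shift (p : Nat) : ∀ E : List Nat, (∀ x ∈ E, p + 1 ≤ x) → pvFirstGe p E = pvFirstGe (p + 1) E := by
  intro E hE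
  cases E with
  | nil => rfl
  | cons q t =>
    have := hE q (by simp)
    rw [pvFirstGe, pvFirstGe, if_pos (by omega), if_pos (by omega)]

theorem pvEqStarts_cons_short (c : Char) (st en : Nat) (rs : List (Char × Nat × Nat))
    (h : en - st < 2) : pvEqStarts ((c, st, en) :: rs) = pvEqStarts rs := by
  simp only [pvEqStarts, List.filterMap_cons]
  rw [if_neg (by omega)]

theorem pvEqStarts_cons_long (c : Char) (st en : Nat) (rs : List (Char × Nat × Nat))
    (h : 2 ≤ en - st) : pvEqStarts ((c, st, en) :: rs) = st :: pvEqStarts rs := by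
  simp only [pvEqStarts, List.filterMap_cons]
  rw [if_pos h]

theorem pvFirstGe_mem : ∀ (p : Nat) (E : List Nat) (x : Nat), pvFirstGe p E = some x → x ∈ E := by
  intro p E
  induction E with
  | nil => intro x hx; simp [pvFirstGe] at hx
  | cons q t ih =>
    intro x hx
    rw [pvFirstGe] at hx
    by_cases h : p ≤ q
    · rw [if_pos h] at hx; simp at hx; simp [hx]
    · rw [if_neg h] at hx; simp [ih x hx]

-- characters inside a maximal run are the run's character
theorem pvDropChars (L : List Char) (p : Nat) (c : Char) (t : List Char) (hdrop : L.drop p = c :: t) :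
    ∀ q, p ≤ q → q < p + pvRunLen c t + 1 → L.getD q ' ' = c := by
  intro q hq1 hq2
  have hget : L.getD q ' ' = (L.drop p).getD (q - p) ' ' := by
    have hpq : p + (q - p) = q := by omega
    simp only [List.getD_eq_getElem?_getD, List.getElem?_drop, hpq]
  rw [hget, hdrop]
  rcases Nat.eq_or_lt_of_le hq1 with h | h
  · simp [← h]
  · have : q - p = (q - p - 1) + 1 := by omega
    rw [this]
    simp only [List.getD_cons_succ]
    exact pvRunLen_chars c t (q - p - 1) (by omega)

-- the suffix after a run
theorem pvDropRun (L : List Char) (p : Nat) (c : Char) (t : List Char) (hdrop : L.drop p = c :: t) :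
    L.drop (p + pvRunLen c t + 1) = t.drop (pvRunLen c t) := by
  have : L.drop (p + pvRunLen c t + 1) = (L.drop p).drop (pvRunLen c t + 1) := by
    rw [List.drop_drop, Nat.add_assoc]

  rw [this, hdrop]
  simp

-- the character after a maximal run differs from the run's character
theorem pvDropMax (L : List Char) (p : Nat) (c : Char) (t : List Char) (hdrop : L.drop p = c :: t)
    (he : p + pvRunLen c t + 1 < L.length) : L.getD (p + pvRunLen c t + 1) ' ' ≠ c := by
  have hrest := pvDropRun L p c t hdrop
  have hget : L.getD (p + pvRunLen c t + 1) ' ' = (t.drop (pvRunLen c t)).getD 0 ' ' := by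
    rw [← hrest]
    simp only [List.getD_eq_getElem?_getD, List.getElem?_drop, Nat.add_zero]
  rw [hget]
  rcases pvRunLen_max c t with h | h
  · exfalso
    have : (t.drop (pvRunLen c t)).length = 0 := by rw [h]; rfl
    have h2 : (L.drop (p + pvRunLen c t + 1)).length = L.length - (p + pvRunLen c t + 1) := by simp
    rw [hrest] at h2
    omega
  · exact h

-- local alt agreement: the char scan equals the table lookup on the suffix table
theorem pvAlt_local : ∀ (m : Nat) (l : List Char) (p n : Nat), l.length ≤ m → n = p + l.length →
    pvFirstEqAdj l = pvAltLen n p (pvEqStarts (pvRLE l p)) := by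
  intro m
  induction m with
  | zero =>
    intro l p n hm hn
    have : l = [] := List.eq_nil_of_length_eq_zero (by omega)
    subst this
    simp [pvFirstEqAdj, pvAltLen, pvRLE, pvEqStarts, pvFirstGe] at hn ⊢
    omega
  | succ m ih =>
    intro l p n hm hn
    cases l with
    | nil =>
      simp [pvFirstEqAdj, pvAltLen, pvRLE, pvEqStarts, pvFirstGe] at hn ⊢
      omega
    | cons c t =>
      by_cases hk : pvRunLen c t = 0
      · -- run of length 1
        simp only [pvRLE]
        rw [hk, pvEqStarts_cons_short c p (p + 0 + 1) _ (by omega)]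
        simp only [List.drop_zero, Nat.add_zero]
        cases t with
        | nil =>
          simp only [pvRLE, pvEqStarts, List.filterMap_nil, pvAltLen, pvFirstGe]
          simp [pvFirstEqAdj]
          simp at hn
          omega
        | cons b t' =>
          have hbc : ¬ b = c := by
            intro h; rw [pvRunLen, if_pos h] at hk; omega
          have hcb : ¬ c = b := fun h => hbc h.symm
          rw [pvFirstEqAdj, if_neg hcb]
          have hlen : n = (p + 1) + (b :: t').length := by simp at hn ⊢; omega
          rw [ih (b :: t') (p + 1) n (by simp at hm ⊢; omega) hlen]
          -- pvAltLen n p E = pvAltLen n (p+1) E + 1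
          set E := pvEqStarts (pvRLE (b :: t') (p + 1)) with hE
          have hb : ∀ x ∈ E, p + 1 ≤ x ∧ x + 2 ≤ n := by
            intro x hx
            have := pvEqStarts_bounds m (b :: t') (p + 1) x (by simp at hm ⊢; omega) hx
            omega
          rw [pvAltLen, pvAltLen, ← pvFirstGe_shift p E (fun x hx => (hb x hx).1)]
          cases hfg : pvFirstGe p E with
          | none =>
            simp only [Option.getD_none]
            simp at hlen
            omega
          | some x =>
            have hx := hb x (pvFirstGe_mem p E x hfg)
            simp only [Option.getD_some]
            omega
      · -- run of length ≥ 2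
        have ht : ∃ t', t = c :: t' := by
          cases t with
          | nil => rw [pvRunLen] at hk; omega
          | cons b t' =>
            by_cases h : b = c
            · exact ⟨t', by rw [h]⟩
            · rw [pvRunLen, if_neg h] at hk; omega
        obtain ⟨t', ht⟩ := ht
        subst ht
        rw [pvFirstEqAdj, if_pos rfl]
        simp only [pvRLE]
        rw [pvEqStarts_cons_long c p (p + pvRunLen c (c :: t') + 1) _ (by omega)]
        rw [pvAltLen, pvFirstGe, if_pos (le_refl p)]
        simp only [Option.getD_some]
        omega

-- at a run boundary q, the global table's first-≥-q lookup equals the suffix table's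
theorem pvFirstGe_split (L : List Char) : ∀ (m p q : Nat), L.length - p ≤ m → p ≤ q → q ≤ L.length →
    (q = 0 ∨ q = L.length ∨ L.getD (q - 1) ' ' ≠ L.getD q ' ') →
    pvFirstGe q (pvEqStarts (pvRLE (L.drop p) p)) = pvFirstGe q (pvEqStarts (pvRLE (L.drop q) q)) := by
  intro m
  induction m with
  | zero =>
    intro p q h1 h2 h3 hb
    have : p = q := by omega
    rw [this]
  | succ m ih =>
    intro p q hm hpq hq hb
    rcases Nat.eq_or_lt_of_le hpq with heq | hlt
    · rw [heq]
    · have hpn : p < L.length := by omega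
      rcases hd : L.drop p with _ | ⟨c, t⟩
      · exfalso
        have hlen : (L.drop p).length = L.length - p := by simp
        rw [hd] at hlen
        simp at hlen
        omega
      · have hlen : (L.drop p).length = L.length - p := by simp
        rw [hd] at hlen
        simp only [List.length_cons] at hlen
        have hkle := pvRunLen_le c t
        by_cases he : p + pvRunLen c t + 1 ≤ q
        · -- the whole head run lies before q: skip it on the left
          simp only [pvRLE]
          have htail : pvFirstGe q (pvEqStarts (pvRLE (t.drop (pvRunLen c t)) (p + pvRunLen c t + 1))) =
              pvFirstGe q (pvEqStarts (pvRLE (L.drop q) q)) := by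
            rw [← pvDropRun L p c t hd]
            exact ih (p + pvRunLen c t + 1) q (by omega) he hq hb
          by_cases h2 : 2 ≤ p + pvRunLen c t + 1 - p
          · rw [pvEqStarts_cons_long c p (p + pvRunLen c t + 1) _ h2,
              pvFirstGe, if_neg (by omega)]
            exact htail
          · rw [pvEqStarts_cons_short c p (p + pvRunLen c t + 1) _ (by omega)]
            exact htail
        · -- q strictly inside the run contradicts the boundary hypothesis
          exfalso
          have hc1 : L.getD (q - 1) ' ' = c :=
            pvDropChars L p c t hd (q - 1) (by omega) (by omega)
          have hc2 : L.getD q ' ' = c :=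
            pvDropChars L p c t hd q (by omega) (by omega)
          rcases hb with h | h | h
          · omega
          · omega
          · exact h (hc1.trans hc2.symm)

-- global alt agreement at a boundary position
theorem pvAlt_global (L : List Char) (q : Nat) (hq : q ≤ L.length)
    (hb : q = 0 ∨ q = L.length ∨ L.getD (q - 1) ' ' ≠ L.getD q ' ') :
    pvFirstEqAdj (L.drop q) = pvAltLen L.length q (pvEqStarts (pvRLE L 0)) := by
  rw [pvAlt_local (L.drop q).length (L.drop q) q L.length (le_refl _) (by simp; omega)]
  have h2 := pvFirstGe_split L (L.length - 0) 0 q (by omega) (Nat.zero_le q) hq hb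
  rw [List.drop_zero] at h2
  rw [pvAltLen, pvAltLen, h2]

-- fuel irrelevance of A's outer loop
theorem pvLeadZeros_pos (L : List Char) (j : Nat) (hj : j < L.length) (hc : L.getD j ' ' = '0') :
    1 ≤ pvLeadZeros (L.drop j) := by
  have hd : L.drop j = L.getD j ' ' :: L.drop (j + 1) := by
    rw [List.getD_eq_getElem L ' ' hj]
    exact (List.getElem_cons_drop hj).symm
  rw [hd, hc, pvLeadZeros]
  simp

theorem pvFI (L : List Char) (n : Nat) (hn : n = L.length) : ∀ (f j g : Nat), n - j < f → n - j < g →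
    pvLoopA L n j f = pvLoopA L n j g := by
  intro f
  induction f with
  | zero => intro j g h1 h2; omega
  | succ f ih =>
    intro j g hf hg
    match g, hg with
    | g + 1, hg =>
      rw [pvLoopA, pvLoopA]
      by_cases hj : j < n - 10
      · rw [if_pos hj, if_pos hj]
        have hjn : j < L.length := by omega
        by_cases hc : L.getD j ' ' = '0'
        · rw [if_pos hc, if_pos hc]
          have hz : 1 ≤ pvLeadZeros (L.drop j) := pvLeadZeros_pos L j hjn hc
          simp only
          by_cases h1 : 10 ≤ pvLeadZeros (L.drop j) ∧ j + pvLeadZeros (L.drop j) < n - 8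
          · rw [if_pos h1, if_pos h1]
            by_cases h2 : 8 ≤ pvFirstEqAdj (L.drop (j + pvLeadZeros (L.drop j)))
            · rw [if_pos h2, if_pos h2]
            · rw [if_neg h2, if_neg h2]
              exact ih (j + pvLeadZeros (L.drop j)) g (by omega) (by omega)
          · rw [if_neg h1, if_neg h1]
            exact ih (j + pvLeadZeros (L.drop j)) g (by omega) (by omega)
        · rw [if_neg hc, if_neg hc]
          exact ih (j + 1) g (by omega) (by omega)
      · rw [if_neg hj, if_neg hj]

-- canonical-fuel version of A's loop
def pvAL (L : List Char) (n j : Nat) : Option Nat := pvLoopA L n j (n - j + 1)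

theorem pvAL_stop (L : List Char) (n j : Nat) (h : ¬ j < n - 10) : pvAL L n j = none := by
  rw [pvAL, pvLoopA, if_neg h]

theorem pvAL_nonzero (L : List Char) (n j : Nat) (hn : n = L.length) (h : j < n - 10)
    (hc : L.getD j ' ' ≠ '0') : pvAL L n j = pvAL L n (j + 1) := by
  rw [pvAL, pvAL, pvLoopA, if_pos h, if_neg hc]
  exact pvFI L n hn (n - j) (j + 1) (n - (j + 1) + 1) (by omega) (by omega)

theorem pvAL_zero (L : List Char) (n j : Nat) (hn : n = L.length) (h : j < n - 10)
    (hc : L.getD j ' ' = '0') :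
    pvAL L n j =
      (if 10 ≤ pvLeadZeros (L.drop j) ∧ j + pvLeadZeros (L.drop j) < n - 8 then
        (if 8 ≤ pvFirstEqAdj (L.drop (j + pvLeadZeros (L.drop j))) then
          some (j + (j + pvLeadZeros (L.drop j) - j) / 2)
        else pvAL L n (j + pvLeadZeros (L.drop j)))
      else pvAL L n (j + pvLeadZeros (L.drop j))) := by
  have hz : 1 ≤ pvLeadZeros (L.drop j) := pvLeadZeros_pos L j (by omega) hc
  rw [pvAL, pvLoopA, if_pos h, if_pos hc]
  simp only
  have hfi : pvLoopA L n (j + pvLeadZeros (L.drop j)) (n - j) =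
      pvAL L n (j + pvLeadZeros (L.drop j)) := by
    rw [pvAL]
    exact pvFI L n hn (n - j) (j + pvLeadZeros (L.drop j))
      (n - (j + pvLeadZeros (L.drop j)) + 1) (by omega) (by omega)
  by_cases h1 : 10 ≤ pvLeadZeros (L.drop j) ∧ j + pvLeadZeros (L.drop j) < n - 8
  · rw [if_pos h1, if_pos h1]
    by_cases h2 : 8 ≤ pvFirstEqAdj (L.drop (j + pvLeadZeros (L.drop j)))
    · rw [if_pos h2, if_pos h2]
    · rw [if_neg h2, if_neg h2, hfi]
  · rw [if_neg h1, if_neg h1, hfi]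

-- skipping a stretch of non-'0' characters
theorem pvAL_stretch (L : List Char) (n : Nat) (hn : n = L.length) :
    ∀ (d j : Nat), (∀ q, j ≤ q → q < j + d → L.getD q ' ' ≠ '0') → j + d ≤ n →
      pvAL L n j = pvAL L n (j + d) := by
  intro d
  induction d with
  | zero => intro j _ _; rfl
  | succ d ih =>
    intro j hch hle
    by_cases hj : j < n - 10
    · rw [pvAL_nonzero L n j hn hj (hch j (le_refl j) (by omega))]
      rw [ih (j + 1) (fun q h1 h2 => hch q (by omega) (by omega)) (by omega)]
      congr 1
      omega
    · rw [pvAL_stop L n j hj, pvAL_stop L n (j + (d + 1)) (by omega)]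

-- MAIN: A's char scan from max p sf equals B's run scan over the suffix table at p
theorem pvMain (L : List Char) (n sf : Nat) (eqs : List Nat) (hn : n = L.length) (h20 : 20 ≤ n)
    (heqs : eqs = pvEqStarts (pvRLE L 0)) :
    ∀ (m p : Nat), n - p ≤ m → p ≤ n →
      pvAL L n (max p sf) = pvScanB n sf eqs (pvRLE (L.drop p) p) := by
  intro m
  induction m with
  | zero =>
    intro p hm hp
    have hdrop : L.drop p = [] := by
      apply List.drop_eq_nil_of_le
      omega
    rw [hdrop]
    simp only [pvRLE, pvScanB]
    have := le_max_left p sf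
    exact pvAL_stop L n (max p sf) (by omega)
  | succ m ih =>
    intro p hm hp
    rcases hd : L.drop p with _ | ⟨c, t⟩
    · simp only [pvRLE, pvScanB]
      have hlen : (L.drop p).length = L.length - p := by simp
      rw [hd] at hlen
      simp at hlen
      have := le_max_left p sf
      exact pvAL_stop L n (max p sf) (by omega)
    · have hlen : (L.drop p).length = L.length - p := by simp
      rw [hd] at hlen
      simp only [List.length_cons] at hlen
      have hkle := pvRunLen_le c t
      have hpn : p < n := by omega
      have hele : p + pvRunLen c t + 1 ≤ n := by omega
      have hchars := pvDropChars L p c t hd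
      have hrest : L.drop (p + pvRunLen c t + 1) = t.drop (pvRunLen c t) := pvDropRun L p c t hd
      have hIH : pvAL L n (max (p + pvRunLen c t + 1) sf) =
          pvScanB n sf eqs (pvRLE (t.drop (pvRunLen c t)) (p + pvRunLen c t + 1)) := by
        rw [← hrest]
        exact ih (p + pvRunLen c t + 1) (by omega) hele
      simp only [pvRLE, pvScanB]
      by_cases hskip : c ≠ '0' ∨ p + pvRunLen c t + 1 ≤ sf
      · rw [if_pos hskip]
        by_cases hesf : p + pvRunLen c t + 1 ≤ sf
        · -- the run ends before sf: A's position stays at sf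
          rw [max_eq_right hesf] at hIH
          rw [max_eq_right (by omega : p ≤ sf)]
          exact hIH
        · -- run past sf but non-'0': A walks through it one char at a time
          have hc0 : c ≠ '0' := by
            rcases hskip with h | h
            · exact h
            · exact absurd h hesf
          have hjlt : max p sf < p + pvRunLen c t + 1 := max_lt (by omega) (by omega)
          have hstr := pvAL_stretch L n hn (p + pvRunLen c t + 1 - max p sf) (max p sf)
            (fun q h1 h2 => by
              rw [hchars q (le_trans (le_max_left p sf) h1) (by omega)]
              exact hc0)
            (by omega)
          rw [show max p sf + (p + pvRunLen c t + 1 - max p sf) = p + pvRunLen c t + 1 by omega] at hstr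
          rw [max_eq_left (by omega : sf ≤ p + pvRunLen c t + 1)] at hIH
          rw [hstr]
          exact hIH
      · rw [if_neg hskip]
        have hc0 : c = '0' := by
          by_contra h
          exact hskip (Or.inl h)
        have hsfe : sf < p + pvRunLen c t + 1 := by
          by_contra h
          exact hskip (Or.inr (by omega))
        subst hc0
        have hzsp : p ≤ max p sf := le_max_left _ _
        have hzse : max p sf < p + pvRunLen '0' t + 1 := max_lt (by omega) (by omega)
        by_cases hstop : n - 10 ≤ max p sf
        · rw [if_pos hstop]
          exact pvAL_stop L n (max p sf) (by omega)
        · rw [if_neg hstop]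
          have hzchar : L.getD (max p sf) ' ' = '0' := hchars (max p sf) hzsp hzse
          have hcons : pvRunLen '0' ('0' :: t) = pvRunLen '0' t + 1 := by
            rw [pvRunLen, if_pos rfl]
          have hzrun : pvLeadZeros (L.drop (max p sf)) = p + pvRunLen '0' t + 1 - max p sf := by
            have hdz : L.drop (max p sf) = ('0' :: t).drop (max p sf - p) := by
              rw [← hd, List.drop_drop]
              congr 1
              omega
            rw [pvLeadZeros_eq_runlen, hdz,
              pvRunLen_drop '0' ('0' :: t) (max p sf - p) (by rw [hcons]; omega), hcons]
            omega
          have hzse' : max p sf + (p + pvRunLen '0' t + 1 - max p sf) = p + pvRunLen '0' t + 1 := by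
            omega
          have hbnd : p + pvRunLen '0' t + 1 = 0 ∨ p + pvRunLen '0' t + 1 = L.length ∨
              L.getD (p + pvRunLen '0' t + 1 - 1) ' ' ≠ L.getD (p + pvRunLen '0' t + 1) ' ' := by
            by_cases heL : p + pvRunLen '0' t + 1 = L.length
            · exact Or.inr (Or.inl heL)
            · refine Or.inr (Or.inr ?_)
              have h1 : L.getD (p + pvRunLen '0' t + 1 - 1) ' ' = '0' :=
                hchars (p + pvRunLen '0' t + 1 - 1) (by omega) (by omega)
              have h2 : L.getD (p + pvRunLen '0' t + 1) ' ' ≠ '0' :=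
                pvDropMax L p '0' t hd (by omega)
              rw [h1]
              exact fun hh => h2 hh.symm
          have halt : pvFirstEqAdj (L.drop (p + pvRunLen '0' t + 1)) =
              pvAltLen n (p + pvRunLen '0' t + 1) eqs := by
            rw [heqs]
            have hg := pvAlt_global L (p + pvRunLen '0' t + 1) (by omega) hbnd
            rw [← hn] at hg
            exact hg
          rw [pvAL_zero L n (max p sf) hn (by omega) hzchar, hzrun, hzse']
          have hmaxe : max (p + pvRunLen '0' t + 1) sf = p + pvRunLen '0' t + 1 :=
            max_eq_left (by omega)
          by_cases h1 : 10 ≤ p + pvRunLen '0' t + 1 - max p sf ∧ p + pvRunLen '0' t + 1 < n - 8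
          · rw [if_pos h1]
            by_cases h8 : 8 ≤ pvFirstEqAdj (L.drop (p + pvRunLen '0' t + 1))
            · rw [if_pos h8, if_pos ⟨h1.1, h1.2, by rw [← halt]; exact h8⟩]
            · rw [if_neg h8, if_neg (fun hcc => h8 (by rw [halt]; exact hcc.2.2))]
              rw [hmaxe] at hIH
              exact hIH
          · rw [if_neg h1, if_neg (fun hcc => h1 ⟨hcc.1, hcc.2.1⟩)]
            rw [hmaxe] at hIH
            exact hIH

theorem extract_eq (bits : String) :
    extract_first_packet_py bits = extract_first_packet_py_alt bits := by
  unfold extract_first_packet_py extract_first_packet_py_alt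
  set L := bits.toList with hLdef
  set n := L.length with hn
  by_cases h20 : n < 20
  · rw [if_pos (Or.inr h20), if_pos h20]
  · rw [if_neg (by omega : ¬ (n = 0 ∨ n < 20)), if_neg h20]
    have h20' : 20 ≤ n := by omega
    have hgetd : ∀ (j : Nat), L.getD j ' ' = (L.drop j).getD 0 ' ' := by
      intro j
      simp only [List.getD_eq_getElem?_getD, List.getElem?_drop, Nat.add_zero]
    -- B's table-based first index equals A's leading-zero count
    have hi : (match pvRLE L 0 with
        | [] => 0
        | (c, _, e) :: _ => if c = '0' then e else 0) = pvLeadZeros L := by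
      rcases hL : L with _ | ⟨c, t⟩
      · simp [pvRLE, pvLeadZeros]
      · simp only [pvRLE]
        by_cases hc : c = '0'
        · subst hc
          rw [if_pos rfl, pvLeadZeros, if_pos rfl, pvLeadZeros_eq_runlen]
          omega
        · rw [if_neg hc, pvLeadZeros, if_neg hc]
    have hile : pvLeadZeros L ≤ n := by
      rw [pvLeadZeros_eq_runlen, hn]
      exact pvRunLen_le '0' L
    have hbnd : pvLeadZeros L = 0 ∨ pvLeadZeros L = L.length ∨
        L.getD (pvLeadZeros L - 1) ' ' ≠ L.getD (pvLeadZeros L) ' ' := by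
      by_cases h0 : pvLeadZeros L = 0
      · exact Or.inl h0
      · by_cases hnn : pvLeadZeros L = L.length
        · exact Or.inr (Or.inl hnn)
        · refine Or.inr (Or.inr ?_)
          have h1 : L.getD (pvLeadZeros L - 1) ' ' = '0' := by
            apply pvRunLen_chars '0' L
            rw [← pvLeadZeros_eq_runlen]
            omega
          have h2 : L.getD (pvLeadZeros L) ' ' ≠ '0' := by
            rw [hgetd, pvLeadZeros_eq_runlen]
            rcases pvRunLen_max '0' L with h | h
            · exfalso
              have hl2 : (L.drop (pvRunLen '0' L)).length = L.length - pvRunLen '0' L := by simp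
              rw [h] at hl2
              simp at hl2
              rw [pvLeadZeros_eq_runlen] at hnn hile
              omega
            · exact h
          rw [h1]
          exact fun hh => h2 hh.symm
    have halt : pvFirstEqAdj (L.drop (pvLeadZeros L)) =
        pvAltLen n (pvLeadZeros L) (pvEqStarts (pvRLE L 0)) := by
      have hg := pvAlt_global L (pvLeadZeros L) (by omega) hbnd
      rw [← hn] at hg
      exact hg
    have hloopmain : pvLoopA L n (pvLeadZeros L + pvFirstEqAdj (L.drop (pvLeadZeros L)) + 30) (n + 1) =
        pvScanB n (pvLeadZeros L + pvFirstEqAdj (L.drop (pvLeadZeros L)) + 30)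
          (pvEqStarts (pvRLE L 0)) (pvRLE L 0) := by
      rw [pvFI L n hn (n + 1) (pvLeadZeros L + pvFirstEqAdj (L.drop (pvLeadZeros L)) + 30)
        (n - (pvLeadZeros L + pvFirstEqAdj (L.drop (pvLeadZeros L)) + 30) + 1) (by omega) (by omega)]
      have hm := pvMain L n (pvLeadZeros L + pvFirstEqAdj (L.drop (pvLeadZeros L)) + 30)
        (pvEqStarts (pvRLE L 0)) hn h20' rfl n 0 (by omega) (Nat.zero_le n)
      rw [Nat.zero_max, List.drop_zero] at hm
      exact hm
    simp only [← hn, hi, ← halt, hloopmain]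

-- ===== VERDICT (by name: the statement is the Claim_ definition above) =====
theorem extract_first_packet_py_spec : Claim_equal_extract_first_packet_py := by
  intro bits _
  unfold Spec_extract_first_packet_py
  exact extract_eq bits
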